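-- pv_equiv track=rewrite | github.com/HuxleyBerry/advent-of-code | 2024/day15/p2.py | count_grid
-- ===== SOURCE A (Python) =====
-- def count_grid(grid):
--     a,b,c = 0,0,0
--     for row in grid:
--         for cell in row:
--             if cell == "#":
--                 a += 1
--             elif cell == "[":
--                 b += 1
--             elif cell == "]":
--                 c += 1
--     return a,b,c
-- ===== SOURCE B (Python) =====
-- def count_grid(grid):
--     def total(sym):
--         return sum(row.count(sym) for row in grid)
--     return total("#"), total("["), total("]")
-- ===== Notes on version B (the rewrite author's own statement) =====
-- stated objective: idiomatic
-- what changed: Replaces the single branching pass with three accumulators by three staged passes, each summing the built-in per-row .count of one symbol; no per-cell branching or accumulator tuple remains.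
import Mathlib
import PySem

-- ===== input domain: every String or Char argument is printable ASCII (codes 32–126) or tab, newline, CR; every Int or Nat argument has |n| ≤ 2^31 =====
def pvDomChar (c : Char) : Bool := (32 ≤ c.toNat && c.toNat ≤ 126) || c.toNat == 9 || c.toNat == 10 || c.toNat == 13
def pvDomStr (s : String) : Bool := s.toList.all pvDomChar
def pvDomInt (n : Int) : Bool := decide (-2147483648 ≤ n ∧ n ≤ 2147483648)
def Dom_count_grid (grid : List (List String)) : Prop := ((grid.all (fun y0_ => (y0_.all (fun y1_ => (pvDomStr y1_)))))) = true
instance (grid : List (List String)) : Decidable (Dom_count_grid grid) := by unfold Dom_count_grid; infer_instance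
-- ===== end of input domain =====

-- B replaces A's single branching pass with three accumulators by three staged
-- passes, each summing the per-row count of one symbol (idiomatic).

-- ===== PORT A =====
def count_grid (grid : List (List String)) : Int × Int × Int :=
  let abc : Int × Int × Int :=
    grid.foldl (fun abc row =>
      row.foldl (fun abc cell =>
        if cell = "#" then (abc.1 + 1, abc.2.1, abc.2.2)
        else if cell = "[" then (abc.1, abc.2.1 + 1, abc.2.2)
        else if cell = "]" then (abc.1, abc.2.1, abc.2.2 + 1)
        else abc) abc) (0, 0, 0)
  abc

-- ===== PORT B =====
-- Source B's inner helper total(sym): sum of row.count(sym) over the rows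
def count_grid_total (grid : List (List String)) (sym : String) : Int :=
  (grid.map (fun row => (PySem.List.count row sym : Int))).sum

def count_grid_alt (grid : List (List String)) : Int × Int × Int :=
  (count_grid_total grid "#", count_grid_total grid "[", count_grid_total grid "]")

-- ===== PRECONDITION & SPEC =====
def Spec_count_grid (grid : List (List String)) (out : Int × Int × Int) : Prop := out = count_grid_alt grid
instance (grid : List (List String)) (out : Int × Int × Int) : Decidable (Spec_count_grid grid out) := by unfold Spec_count_grid; infer_instance

-- ===== CLAIM (what is proved, stated in full; the proofs are below) =====
def Claim_equal_count_grid : Prop := ∀ (grid : List (List String)), Dom_count_grid grid → Spec_count_grid grid (count_grid grid)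

-- ===== LEMMAS AND PROOFS =====

-- A's inner loop adds the per-row counts of "#", "[", "]" to the accumulator.
theorem count_grid_inner (row : List String) (abc : Int × Int × Int) :
    row.foldl (fun abc cell =>
        if cell = "#" then (abc.1 + 1, abc.2.1, abc.2.2)
        else if cell = "[" then (abc.1, abc.2.1 + 1, abc.2.2)
        else if cell = "]" then (abc.1, abc.2.1, abc.2.2 + 1)
        else abc) abc
    = (abc.1 + row.count "#", abc.2.1 + row.count "[", abc.2.2 + row.count "]") := by
  induction row generalizing abc with
  | nil => simp
  | cons x xs ih =>
    simp only [List.foldl_cons, ih, List.count_cons]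
    by_cases h1 : x = "#" <;> by_cases h2 : x = "[" <;> by_cases h3 : x = "]" <;>
      simp_all <;> omega

-- A's outer loop accumulates, per symbol, the sum of the per-row counts.
theorem count_grid_outer (grid : List (List String)) (abc : Int × Int × Int) :
    grid.foldl (fun abc row =>
      row.foldl (fun abc cell =>
        if cell = "#" then (abc.1 + 1, abc.2.1, abc.2.2)
        else if cell = "[" then (abc.1, abc.2.1 + 1, abc.2.2)
        else if cell = "]" then (abc.1, abc.2.1, abc.2.2 + 1)
        else abc) abc) abc
    = (abc.1 + (grid.map (fun row => (row.count "#" : Int))).sum,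
       abc.2.1 + (grid.map (fun row => (row.count "[" : Int))).sum,
       abc.2.2 + (grid.map (fun row => (row.count "]" : Int))).sum) := by
  induction grid generalizing abc with
  | nil => simp
  | cons r rs ih =>
    rw [List.foldl_cons, count_grid_inner, ih]
    simp only [List.map_cons, List.sum_cons, Prod.ext_iff]
    omega

-- ===== VERDICT (by name: the statement is the Claim_ definition above) =====
theorem count_grid_spec : Claim_equal_count_grid := by
  intro grid _
  unfold Spec_count_grid count_grid count_grid_alt count_grid_total
  simp only [count_grid_outer, PySem.List.count_eq]
  simp
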